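-- pv_equiv track=rewrite | github.com/the-omega-institute/automath | theory/2026_golden_ratio_driven_scan_projection_generation_recursive_emergence/scripts/equational_theory/gf_prime_power_scan.py | first_pairs
-- ===== SOURCE A (Python) =====
-- def first_pairs(bits: int, equation_count: int, limit: int) -> list[tuple[int, int]]:
--     pairs = []
--     while bits and len(pairs) < limit:
--         low_bit = bits & -bits
--         position = low_bit.bit_length() - 1
--         bits -= low_bit
--         pairs.append((position // equation_count + 1, position % equation_count + 1))
--     return pairs
-- ===== SOURCE B (Python) =====
-- def first_pairs(bits: int, equation_count: int, limit: int) -> list[tuple[int, int]]: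
--     pairs = []
--     remaining = bits
--     pos = 0
--     while remaining and len(pairs) < limit:
--         if remaining & 1:
--             pairs.append((pos // equation_count + 1, pos % equation_count + 1))
--         remaining >>= 1
--         pos += 1
--     return pairs
-- ===== Notes on version B (the rewrite author's own statement) =====
-- stated objective: alternative
-- what changed: Instead of repeatedly isolating the lowest set bit with bits & -bits and taking its bit_length, B scans bit positions upward with a position counter, testing remaining & 1 and arithmetic-shifting remaining right each step.
import Mathlib
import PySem

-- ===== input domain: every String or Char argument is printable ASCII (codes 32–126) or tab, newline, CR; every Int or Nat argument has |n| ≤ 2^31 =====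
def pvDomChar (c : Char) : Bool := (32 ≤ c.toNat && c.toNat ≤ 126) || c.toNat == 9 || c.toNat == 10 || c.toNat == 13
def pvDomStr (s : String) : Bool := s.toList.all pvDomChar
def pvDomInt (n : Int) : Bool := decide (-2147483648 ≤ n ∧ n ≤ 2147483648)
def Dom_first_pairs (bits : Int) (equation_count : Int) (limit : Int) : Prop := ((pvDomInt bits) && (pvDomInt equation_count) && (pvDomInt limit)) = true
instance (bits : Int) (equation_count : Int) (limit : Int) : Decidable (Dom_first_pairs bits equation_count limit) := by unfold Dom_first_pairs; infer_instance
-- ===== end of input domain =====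

-- B replaces A's lowest-set-bit isolation (bits & -bits, bit_length) by an upward position
-- scan testing remaining & 1 and shifting right; alternative decomposition, same return value.

-- ===== PORT A =====
-- the while loop of A: the Nat argument is limit - len(pairs), the remaining capacity
def pvLoopA : Nat → Int → Int → List (Int × Int)
  | 0, _, _ => []
  | k + 1, bits, ec =>
    if bits = 0 then []
    else
      let low := PySem.Int.band bits (-bits)
      let position : Int := (PySem.Int.bitLength low : Int) - 1
      (PySem.Int.floordiv position ec + 1, PySem.Int.mod position ec + 1)
        :: pvLoopA k (bits - low) ec

def first_pairs (bits : Int) (equation_count : Int) (limit : Int) : List (Int × Int) :=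
  pvLoopA limit.toNat bits equation_count

-- ===== PORT B =====
-- the while loop of B: first Nat is fuel (Python's loop needs none; bitLength bits + limit
-- iterations always suffice, proved below), last Nat is the remaining capacity limit - len(pairs)
def pvLoopB : Nat → Int → Int → Int → Nat → List (Int × Int)
  | 0, _, _, _, _ => []
  | f + 1, remaining, pos, ec, k =>
    if remaining = 0 then []
    else if k = 0 then []
    else if PySem.Int.band remaining 1 ≠ 0 then
      (PySem.Int.floordiv pos ec + 1, PySem.Int.mod pos ec + 1)
        :: pvLoopB f (remaining >>> (1 : Nat)) (pos + 1) ec (k - 1)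
    else pvLoopB f (remaining >>> (1 : Nat)) (pos + 1) ec k

def first_pairs_alt (bits : Int) (equation_count : Int) (limit : Int) : List (Int × Int) :=
  pvLoopB (PySem.Int.bitLength bits + limit.toNat) bits 0 equation_count limit.toNat

-- ===== PRECONDITION & SPEC =====
-- Pre_ excludes exactly the inputs where A (and B) raises ZeroDivisionError:
-- equation_count = 0 while a set bit is reached (bits ≠ 0 and limit > 0).
def Pre_first_pairs (bits : Int) (equation_count : Int) (limit : Int) : Prop :=
  ¬ (equation_count = 0 ∧ bits ≠ 0 ∧ 0 < limit)
instance (bits : Int) (equation_count : Int) (limit : Int) : Decidable (Pre_first_pairs bits equation_count limit) := by unfold Pre_first_pairs; infer_instance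

def pvWitness_first_pairs : Int × Int × Int := (22, 3, 10)

def Spec_first_pairs (bits : Int) (equation_count : Int) (limit : Int) (out : List (Int × Int)) : Prop := out = first_pairs_alt bits equation_count limit
instance (bits : Int) (equation_count : Int) (limit : Int) (out : List (Int × Int)) : Decidable (Spec_first_pairs bits equation_count limit out) := by unfold Spec_first_pairs; infer_instance

-- ===== CLAIM (what is proved, stated in full; the proofs are below) =====
def Claim_equal_first_pairs : Prop := ∀ (bits : Int) (equation_count : Int) (limit : Int), Dom_first_pairs bits equation_count limit → Pre_first_pairs bits equation_count limit → Spec_first_pairs bits equation_count limit (first_pairs bits equation_count limit)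

-- ===== LEMMAS AND PROOFS =====

-- A's loop with the pair position split as pos + (bit index in the shifted value)
def pvLoopAoff : Nat → Int → Int → Int → List (Int × Int)
  | 0, _, _, _ => []
  | k + 1, bits, pos, ec =>
    if bits = 0 then []
    else
      let low := PySem.Int.band bits (-bits)
      let position : Int := (PySem.Int.bitLength low : Int) - 1
      (PySem.Int.floordiv (pos + position) ec + 1, PySem.Int.mod (pos + position) ec + 1)
        :: pvLoopAoff k (bits - low) pos ec

lemma pvLoopAoff_eq (k : Nat) (bits ec : Int) : pvLoopA k bits ec = pvLoopAoff k bits 0 ec := by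
  induction k generalizing bits with
  | zero => rfl
  | succ k ih => simp [pvLoopA, pvLoopAoff, ih]

lemma pvLoopAoff_nil (k : Nat) (pos ec : Int) : pvLoopAoff k 0 pos ec = [] := by
  cases k <;> simp [pvLoopAoff]

-- n &&& (n-1) clears the lowest set bit (Nat side)
lemma pv_nat_and_pred_odd (n : Nat) (h : n % 2 = 1) : n &&& (n - 1) = n - 1 := by
  apply Nat.eq_of_testBit_eq
  intro i
  cases i with
  | zero =>
    simp only [Nat.testBit_zero]
    have h1 : (n - 1) % 2 = 0 := by omega
    simp [h, h1]
  | succ i =>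
    simp only [Nat.testBit_and]
    simp only [Nat.testBit_add_one]
    have h1 : (n - 1) / 2 = n / 2 := by omega
    rw [h1, Bool.and_self]

lemma pv_nat_and_pred_even (t : Nat) (h : 0 < t) :
    (2 * t) &&& (2 * t - 1) = 2 * (t &&& (t - 1)) := by
  apply Nat.eq_of_testBit_eq
  intro i
  cases i with
  | zero =>
    simp only [Nat.testBit_zero]
    have h1 : (2 * t) % 2 = 0 := by omega
    have h2 : (2 * (t &&& (t - 1))) % 2 = 0 := by omega
    simp [h1, h2]
  | succ i =>
    simp only [Nat.testBit_and]
    simp only [Nat.testBit_add_one]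
    have h1 : (2 * t) / 2 = t := by omega
    have h2 : (2 * t - 1) / 2 = t - 1 := by omega
    have h3 : (2 * (t &&& (t - 1))) / 2 = t &&& (t - 1) := by omega
    rw [h1, h2, h3, Nat.testBit_and]

-- bits & -bits over PySem.Int.band, reduced to Nat
lemma pv_band_neg (r : Int) (h : r ≠ 0) :
    PySem.Int.band r (-r) = ((r.natAbs - (r.natAbs &&& (r.natAbs - 1)) : Nat) : Int) := by
  unfold PySem.Int.band
  rcases lt_or_gt_of_ne h with hneg | hpos
  · rw [if_neg (by omega), if_pos (by omega)]
    have e1 : (-r).toNat = r.natAbs := by omega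
    have e2 : (-r - 1).toNat = r.natAbs - 1 := by omega
    rw [e1, e2]
  · rw [if_pos (by omega), if_neg (by omega)]
    have e1 : r.toNat = r.natAbs := by omega
    have e2 : (- -r - 1).toNat = r.natAbs - 1 := by omega
    rw [e1, e2]

lemma pv_low_odd (r : Int) (h : r % 2 = 1) : PySem.Int.band r (-r) = 1 := by
  have h0 : r ≠ 0 := by omega
  rw [pv_band_neg r h0]
  have h1 : r.natAbs % 2 = 1 := by omega
  rw [pv_nat_and_pred_odd _ h1]
  have h2 : 0 < r.natAbs := by omega
  omega

lemma pv_low_even (r : Int) (h0 : r ≠ 0) (h : r % 2 = 0) :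
    PySem.Int.band r (-r) = 2 * PySem.Int.band (r / 2) (-(r / 2)) := by
  have h2 : r / 2 ≠ 0 := by omega
  rw [pv_band_neg r h0, pv_band_neg _ h2]
  have e : r.natAbs = 2 * (r / 2).natAbs := by omega
  rw [e, pv_nat_and_pred_even _ (by omega)]
  have hle : (r / 2).natAbs &&& ((r / 2).natAbs - 1) ≤ (r / 2).natAbs - 1 := Nat.and_le_right
  omega

lemma pv_low_pos (r : Int) (h : r ≠ 0) : 0 < PySem.Int.band r (-r) := by
  rw [pv_band_neg r h]
  have h1 : r.natAbs &&& (r.natAbs - 1) ≤ r.natAbs - 1 := Nat.and_le_right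
  have h2 : 0 < r.natAbs := by omega
  omega

-- bitLength facts
lemma pv_bl_natAbs (r : Int) : PySem.Int.bitLength r = PySem.Int.bitLength (r.natAbs : Int) := by
  unfold PySem.Int.bitLength
  norm_num [Int.natAbs_abs]

lemma pv_bl_mono (b : Nat) : ∀ a : Nat, a ≤ b →
    PySem.Int.bitLength (a : Int) ≤ PySem.Int.bitLength (b : Int) := by
  induction b using Nat.strong_induction_on with
  | _ b ih =>
    intro a hab
    by_cases ha : a = 0
    · simp [ha, PySem.Int.bitLength_zero]
    · have hb : 0 < b := by omega
      rw [PySem.Int.bitLength_natCast (show 0 < a by omega), PySem.Int.bitLength_natCast hb]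
      have := ih (b / 2) (by omega) (a / 2) (by omega)
      omega

lemma pv_bl_div2_le (r : Int) :
    PySem.Int.bitLength (r / 2) ≤ PySem.Int.bitLength r := by
  rw [pv_bl_natAbs, pv_bl_natAbs r]
  exact pv_bl_mono _ _ (by omega)

lemma pv_bl_div2_lt (r : Int) (h0 : r ≠ 0) (h : r % 2 = 0) :
    PySem.Int.bitLength (r / 2) < PySem.Int.bitLength r := by
  rw [pv_bl_natAbs, pv_bl_natAbs r]
  have e1 : 0 < r.natAbs := by omega
  rw [PySem.Int.bitLength_natCast e1]
  have e2 : r.natAbs / 2 = (r / 2).natAbs := by omega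
  rw [e2]
  omega

lemma pv_shiftRight_one (r : Int) : r >>> (1 : Nat) = r / 2 := by
  rw [Int.shiftRight_eq_div_pow]; norm_num

-- core shift lemma: stripping one (zero) low bit off an even value and bumping the offset
lemma pv_shift (k : Nat) : ∀ (rem pos ec : Int), rem ≠ 0 → rem % 2 = 0 →
    pvLoopAoff k rem pos ec = pvLoopAoff k (rem / 2) (pos + 1) ec := by
  induction k with
  | zero => intro _ _ _ _ _; rfl
  | succ k ih =>
    intro rem pos ec h0 h2
    have ht : rem / 2 ≠ 0 := by omega
    simp only [pvLoopAoff, if_neg h0, if_neg ht]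
    rw [pv_low_even rem h0 h2]
    have hlp : 0 < PySem.Int.band (rem / 2) (-(rem / 2)) := pv_low_pos _ ht
    set low' := PySem.Int.band (rem / 2) (-(rem / 2)) with hl
    have hb : PySem.Int.bitLength (2 * low') = PySem.Int.bitLength low' + 1 := by
      rw [PySem.Int.bitLength_of_pos (by omega : (0:Int) < 2 * low')]
      have : PySem.Int.floordiv (2 * low') 2 = low' := by
        rw [PySem.Int.floordiv_eq_ediv_of_pos (by omega)]; omega
      rw [this]
    have hpos : pos + ((PySem.Int.bitLength (2 * low') : Int) - 1)
        = pos + 1 + ((PySem.Int.bitLength low' : Int) - 1) := by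
      rw [hb]; push_cast; ring
    rw [hpos]
    have htail : rem - 2 * low' = 2 * (rem / 2 - low') := by omega
    by_cases hz : rem / 2 - low' = 0
    · rw [htail, hz]
      simp [pvLoopAoff_nil]
    · have := ih (rem - 2 * low') pos ec (by omega) (by omega)
      rw [this]
      have : (rem - 2 * low') / 2 = rem / 2 - low' := by omega
      rw [this]

-- main lemma: B's scan with sufficient fuel equals A's loop with offset tracking
lemma pv_main (f : Nat) : ∀ (rem pos ec : Int) (k : Nat),
    PySem.Int.bitLength rem + k ≤ f → pvLoopB f rem pos ec k = pvLoopAoff k rem pos ec := by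
  induction f with
  | zero =>
    intro rem pos ec k h
    have hk : k = 0 := by omega
    subst hk; rfl
  | succ f ih =>
    intro rem pos ec k h
    by_cases h0 : rem = 0
    · subst h0; simp [pvLoopB, pvLoopAoff_nil]
    cases k with
    | zero => simp [pvLoopB, pvLoopAoff, h0]
    | succ k =>
      have hmod : PySem.Int.band rem 1 = rem % 2 := by
        rw [PySem.Int.band_one, PySem.Int.mod_eq_emod_of_pos (by norm_num)]
      rcases (by omega : rem % 2 = 0 ∨ rem % 2 = 1) with he | ho
      · -- even: B skips, A's offset view shifts
        have hband : ¬ PySem.Int.band rem 1 ≠ 0 := by rw [hmod, he]; simp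
        simp only [pvLoopB, if_neg h0, if_neg (Nat.succ_ne_zero k), if_neg hband,
          pv_shiftRight_one]
        rw [ih (rem / 2) (pos + 1) ec (k + 1)
          (by have := pv_bl_div2_lt rem h0 he; omega)]
        exact (pv_shift (k + 1) rem pos ec h0 he).symm
      · -- odd: both emit the pair at pos
        have hband : PySem.Int.band rem 1 ≠ 0 := by rw [hmod, ho]; simp
        have hlow : PySem.Int.band rem (-rem) = 1 := pv_low_odd rem ho
        have hbl1 : PySem.Int.bitLength 1 = 1 := by decide
        simp only [pvLoopB, pvLoopAoff, if_neg h0, if_neg (Nat.succ_ne_zero k), if_pos hband,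
          pv_shiftRight_one, hlow, Nat.add_sub_cancel, hbl1, Nat.cast_one, sub_self, add_zero]
        congr 1
        rw [ih (rem / 2) (pos + 1) ec k (by have := pv_bl_div2_le rem; omega)]
        by_cases h1 : rem = 1
        · subst h1; norm_num [pvLoopAoff_nil]
        · have hne : rem - 1 ≠ 0 := by omega
          rw [pv_shift k (rem - 1) pos ec hne (by omega)]
          have h12 : (rem - 1) / 2 = rem / 2 := by omega
          rw [h12]

-- ===== VERDICT (by name: the statement is the Claim_ definition above) =====
theorem first_pairs_spec : Claim_equal_first_pairs := by
  intro bits ec limit _ _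
  unfold Spec_first_pairs first_pairs first_pairs_alt
  rw [pvLoopAoff_eq, pv_main (PySem.Int.bitLength bits + limit.toNat) bits 0 ec limit.toNat
    (le_refl _)]
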